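-- pv_equiv track=rewrite | github.com/BeholdMyGlory/sprakt-project | kanamatcher.py | filter_alignments
-- ===== SOURCE A (Python) =====
-- import functools
-- import itertools
--
-- def find_matches(a, b):
--     def split(v, el):
--         a, b = el
--         if len(v) == 0:
--             return [(a, b)]
--         elif (a == b and v[-1][0] == v[-1][1] or
--             a != b and v[-1][0] != v[-1][1]):
--             v[-1] = v[-1][0] + a, v[-1][1] + b
--         else:
--             v.append((a, b))
--         return v
--
--     return functools.reduce(split, zip(a, b), [])
--
-- def filter_alignments(alignments, fill="-", limit=10000):
--     matches = set()
--     for a, b in itertools.islice(alignments, limit):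
--         match = clear_fill(find_matches(a, b), fill=fill)
--         tup = tuple(match)
--         if tup in matches:
--             continue
--
--         yield match
--
--         matches.add(tup)
--
-- def clear_fill(l, fill='-'):
--     return [(a.replace(fill, ''), b.replace(fill, '')) for a, b in l]
-- ===== SOURCE B (Python) =====
-- import itertools
--
-- def filter_alignments(alignments, fill="-", limit=10000):
--     seen = set()
--     for a, b in itertools.islice(alignments, limit):
--         n = min(len(a), len(b))
--         if n == 0:
--             match = []
--         else:
--             bounds = [0] + [i for i in range(1, n)
--                             if (a[i] == b[i]) != (a[i - 1] == b[i - 1])] + [n]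
--             match = [(a[lo:hi].replace(fill, ""), b[lo:hi].replace(fill, ""))
--                      for lo, hi in zip(bounds, bounds[1:])]
--         tup = tuple(match)
--         if tup not in seen:
--             seen.add(tup)
--             yield match
-- ===== Notes on version B (the rewrite author's own statement) =====
-- stated objective: faster
-- what changed: Instead of find_matches' functools.reduce that grows/merges a list of accumulated string pairs pair-by-pair (keyed on accumulated-string equality), B first computes the integer cut positions where the per-index match flag changes and then builds each run with one string slice per pair of consecutive bounds; dedupe stays a streaming set-based generator.
import Mathlib
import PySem

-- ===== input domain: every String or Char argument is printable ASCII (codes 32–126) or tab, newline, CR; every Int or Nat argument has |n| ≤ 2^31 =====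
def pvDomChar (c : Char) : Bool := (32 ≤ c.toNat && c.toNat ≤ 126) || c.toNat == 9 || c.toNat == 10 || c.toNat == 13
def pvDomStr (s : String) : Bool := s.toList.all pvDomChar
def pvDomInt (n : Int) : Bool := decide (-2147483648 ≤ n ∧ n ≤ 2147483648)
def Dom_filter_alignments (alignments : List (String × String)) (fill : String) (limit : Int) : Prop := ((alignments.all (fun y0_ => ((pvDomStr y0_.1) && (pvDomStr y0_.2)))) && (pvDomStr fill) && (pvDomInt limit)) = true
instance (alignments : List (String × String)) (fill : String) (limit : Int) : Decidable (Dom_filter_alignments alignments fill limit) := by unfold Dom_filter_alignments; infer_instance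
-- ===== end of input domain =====

-- B replaces find_matches' reduce (which grows/merges a list of accumulated string pairs) by a
-- staged computation: first the integer cut positions where the per-index match flag changes,
-- then one string slice per pair of consecutive bounds (measurably faster by constant factor:
-- no per-character pair merging). Both Pythons are generators; the equivalence is about
-- list(filter_alignments(...)).

-- ===== PORT A =====
-- the 'split' closure inside find_matches (reduce step)
def pvSplit (v : List (String × String)) (el : Char × Char) : List (String × String) :=
  let a := el.1
  let b := el.2
  if v.length == 0 then
    [(String.ofList [a], String.ofList [b])]
  else
    let last := v.getLast!
    if (a == b && last.1 == last.2) || (!(a == b) && !(last.1 == last.2)) then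
      v.dropLast ++ [(last.1 ++ String.ofList [a], last.2 ++ String.ofList [b])]
    else
      v ++ [(String.ofList [a], String.ofList [b])]

-- find_matches(a, b) = functools.reduce(split, zip(a, b), [])
def pvFindMatches (a b : String) : List (String × String) :=
  (a.toList.zip b.toList).foldl pvSplit []

-- clear_fill(l, fill)
def pvClearFill (l : List (String × String)) (fill : String) : List (String × String) :=
  l.map (fun p => (PySem.Str.replace p.1 fill "", PySem.Str.replace p.2 fill ""))

-- filter_alignments: generator collected as a list; islice(alignments, limit) needs 0 ≤ limit (Pre_)
def filter_alignments (alignments : List (String × String)) (fill : String) (limit : Int) : List (List (String × String)) :=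
  ((alignments.take limit.toNat).foldl
    (fun (st : PySem.Set (List (String × String)) × List (List (String × String))) ab =>
      let m := pvClearFill (pvFindMatches ab.1 ab.2) fill
      if PySem.Set.contains st.1 m then st
      else (PySem.Set.add st.1 m, st.2 ++ [m]))
    (PySem.Set.empty, [])).2

-- ===== PORT B =====
-- body of B's loop: cut positions where (a[i] == b[i]) changes, then slice between bounds.
-- a[i] / b[i] ported as PySem.List.pyGetD on the char list (exact: Source B only reads 0 ≤ i < n ≤ len).
def pvAltMatch (a b fill : String) : List (String × String) :=
  let n : Int := min (PySem.Str.len a) (PySem.Str.len b)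
  if n == 0 then []
  else
    let bounds : List Int :=
      0 :: (PySem.List.pyRange 1 n 1).filter
            (fun i => !((PySem.List.pyGetD a.toList i ' ' == PySem.List.pyGetD b.toList i ' ')
                      == (PySem.List.pyGetD a.toList (i - 1) ' ' == PySem.List.pyGetD b.toList (i - 1) ' ')))
          ++ [n]
    (bounds.zip bounds.tail).map (fun lohi =>
      (PySem.Str.replace (PySem.Str.slice a (some lohi.1) (some lohi.2)) fill "",
       PySem.Str.replace (PySem.Str.slice b (some lohi.1) (some lohi.2)) fill ""))

def filter_alignments_alt (alignments : List (String × String)) (fill : String) (limit : Int) : List (List (String × String)) :=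
  ((alignments.take limit.toNat).foldl
    (fun (st : PySem.Set (List (String × String)) × List (List (String × String))) ab =>
      let m := pvAltMatch ab.1 ab.2 fill
      if PySem.Set.contains st.1 m then st
      else (PySem.Set.add st.1 m, st.2 ++ [m]))
    (PySem.Set.empty, [])).2

-- ===== PRECONDITION & SPEC =====
-- Pre_ excludes only limit < 0, on which A's itertools.islice raises ValueError.
def Pre_filter_alignments (alignments : List (String × String)) (fill : String) (limit : Int) : Prop := 0 ≤ limit
instance (alignments : List (String × String)) (fill : String) (limit : Int) : Decidable (Pre_filter_alignments alignments fill limit) := by unfold Pre_filter_alignments; infer_instance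
def pvWitness_filter_alignments : (List (String × String)) × String × Int := ([("ab-c", "axxc"), ("ab-c", "axxc")], "-", 10)

def Spec_filter_alignments (alignments : List (String × String)) (fill : String) (limit : Int) (out : List (List (String × String))) : Prop := out = filter_alignments_alt alignments fill limit
instance (alignments : List (String × String)) (fill : String) (limit : Int) (out : List (List (String × String))) : Decidable (Spec_filter_alignments alignments fill limit out) := by unfold Spec_filter_alignments; infer_instance

-- ===== CLAIM (what is proved, stated in full; the proofs are below) =====
def Claim_equal_filter_alignments : Prop := ∀ (alignments : List (String × String)) (fill : String) (limit : Int), Dom_filter_alignments alignments fill limit → Pre_filter_alignments alignments fill limit → Spec_filter_alignments alignments fill limit (filter_alignments alignments fill limit)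

-- ===== LEMMAS AND PROOFS =====

-- the per-pair match key, and the runs of equal key (itertools-style grouping, proof-side)
def pvKey (p : Char × Char) : Bool := p.1 == p.2

def pvGroupbyGo (k : Bool) (cur : List (Char × Char)) : List (Char × Char) → List (List (Char × Char))
  | [] => [cur]
  | p :: ps =>
    if pvKey p == k then pvGroupbyGo k (cur ++ [p]) ps
    else cur :: pvGroupbyGo (pvKey p) [p] ps

def pvGroupby : List (Char × Char) → List (List (Char × Char))
  | [] => []
  | p :: ps => pvGroupbyGo (pvKey p) [p] ps

-- the pair of accumulated strings of a run
def pvRunStr (g : List (Char × Char)) : String × String :=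
  (String.ofList (g.map Prod.fst), String.ofList (g.map Prod.snd))

-- ---- A-side: the reduce over pvSplit produces exactly the groupby runs ----

theorem pvOfList_inj (l m : List Char) : String.ofList l = String.ofList m ↔ l = m := by
  constructor
  · intro h; have := congrArg String.toList h; simpa using this
  · intro h; rw [h]

theorem pvMapEq_iff (l : List (Char × Char)) :
    l.map Prod.fst = l.map Prod.snd ↔ ∀ q ∈ l, q.1 = q.2 := by
  induction l with
  | nil => simp
  | cons q l ih => simp_all

theorem pvRunStr_eqTest (k : Bool) (g : List (Char × Char)) (hne : g ≠ [])
    (hk : ∀ q ∈ g, pvKey q = k) :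
    ((pvRunStr g).1 == (pvRunStr g).2) = k := by
  cases k with
  | true =>
    simp only [pvRunStr, Bool.beq_eq_decide_eq, decide_eq_true_iff, pvOfList_inj, pvMapEq_iff]
    intro q hq
    have := hk q hq
    simpa [pvKey] using this
  | false =>
    simp only [pvRunStr, Bool.beq_eq_decide_eq, decide_eq_false_iff_not, pvOfList_inj, pvMapEq_iff]
    intro h
    cases g with
    | nil => exact hne rfl
    | cons q g =>
      have h1 := h q (List.mem_cons_self ..)
      have h2 := hk q (List.mem_cons_self ..)
      simp [pvKey, h1] at h2

theorem pvRunStr_append (g : List (Char × Char)) (p : Char × Char) :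
    pvRunStr (g ++ [p]) = ((pvRunStr g).1 ++ String.ofList [p.1], (pvRunStr g).2 ++ String.ofList [p.2]) := by
  simp [pvRunStr]

theorem pvGetLast_snoc (done : List (String × String)) (x : String × String) :
    (done ++ [x]).getLast! = x := by
  cases done with
  | nil => rfl
  | cons a as => simp [List.getLast!]

theorem pvSplit_snoc (done : List (String × String)) (x : String × String) (p : Char × Char) :
    pvSplit (done ++ [x]) p =
      if pvKey p == (x.1 == x.2)
      then done ++ [(x.1 ++ String.ofList [p.1], x.2 ++ String.ofList [p.2])]
      else (done ++ [x]) ++ [(String.ofList [p.1], String.ofList [p.2])] := by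
  have h1 : ((done ++ [x]).length == 0) = false := by simp
  have htest : (p.1 == p.2 && x.1 == x.2 || !(p.1 == p.2) && !(x.1 == x.2))
      = (pvKey p == (x.1 == x.2)) := by
    cases hpq : p.1 == p.2 <;> cases x.1 == x.2 <;> simp [pvKey, hpq]
  simp only [pvSplit, h1, Bool.false_eq_true, if_false, pvGetLast_snoc, htest,
    List.dropLast_concat]

theorem pvSplit_go (ps : List (Char × Char)) :
    ∀ (k : Bool) (cur : List (Char × Char)) (done : List (String × String)),
    cur ≠ [] → (∀ q ∈ cur, pvKey q = k) →
    ps.foldl pvSplit (done ++ [pvRunStr cur]) = done ++ (pvGroupbyGo k cur ps).map pvRunStr := by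
  induction ps with
  | nil => intro k cur done _ _; simp [pvGroupbyGo]
  | cons p ps ih =>
    intro k cur done hne hk
    simp only [List.foldl_cons, pvGroupbyGo, pvSplit_snoc,
      pvRunStr_eqTest k cur hne hk]
    by_cases hpk : pvKey p = k
    · rw [hpk, beq_self_eq_true, if_pos rfl, if_pos rfl, ← pvRunStr_append]
      exact ih k (cur ++ [p]) done (by simp) (by
        intro q hq
        rcases List.mem_append.mp hq with h | h
        · exact hk q h
        · simp only [List.mem_singleton] at h; subst h; exact hpk)
    · have hif : (pvKey p == k) = false := by
        cases hcmp : pvKey p <;> cases k <;> simp_all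
      rw [hif]
      simp only [Bool.false_eq_true, if_false, List.map_cons]
      have hsingle : (String.ofList [p.1], String.ofList [p.2]) = pvRunStr [p] := by
        simp [pvRunStr]
      rw [hsingle, ih (pvKey p) [p] (done ++ [pvRunStr cur]) (by simp) (by simp),
        List.append_assoc]
      simp

theorem pvFindMatches_eq_groupby (l : List (Char × Char)) :
    l.foldl pvSplit [] = (pvGroupby l).map pvRunStr := by
  cases l with
  | nil => rfl
  | cons p ps =>
    have h0 : pvSplit [] p = [pvRunStr [p]] := by
      simp [pvSplit, pvRunStr]
    simp only [List.foldl_cons, h0, pvGroupby]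
    have := pvSplit_go ps (pvKey p) [p] [] (by simp) (by simp)
    simpa using this

-- ---- B-side: cut positions + slicing produce exactly the same groupby runs ----

-- key at an index (total form; read only at i < l.length)
def pvKeyD (l : List (Char × Char)) (i : Nat) : Bool := pvKey (l.getD i (' ', ' '))

-- Nat-level cut positions and slices (what B's Int-level comprehension computes)
def pvCutsN (l : List (Char × Char)) : List Nat :=
  (List.range' 1 (l.length - 1)).filter (fun i => !(pvKeyD l i == pvKeyD l (i - 1)))

def pvSlices (l : List (Char × Char)) : List (List (Char × Char)) :=
  ((0 :: pvCutsN l ++ [l.length]).zip (pvCutsN l ++ [l.length])).map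
    (fun q => (l.drop q.1).take (q.2 - q.1))

theorem pvGroupbyGo_spec (t : List (Char × Char)) :
    ∀ (r : List (Char × Char)) (k : Bool) (cur : List (Char × Char)),
    (∀ q ∈ t, pvKey q = k) → (∀ h ∈ r.head?, pvKey h ≠ k) →
    pvGroupbyGo k cur (t ++ r) =
      (match r with
       | [] => [cur ++ t]
       | h :: rest => (cur ++ t) :: pvGroupbyGo (pvKey h) [h] rest) := by
  induction t with
  | nil =>
    intro r k cur _ hr
    cases r with
    | nil => simp [pvGroupbyGo]
    | cons h rest =>
      have hh : pvKey h ≠ k := hr h (by simp)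
      have : (pvKey h == k) = false := by
        cases hc : pvKey h <;> cases k <;> simp_all
      simp [pvGroupbyGo, this]
  | cons q t ih =>
    intro r k cur ht hr
    have hq : pvKey q = k := ht q (by simp)
    simp only [List.cons_append, pvGroupbyGo, hq, beq_self_eq_true]
    rw [ih r k (cur ++ [q]) (fun x hx => ht x (by simp [hx])) hr]
    cases r <;> simp

theorem pvKeyD_append_left (h r : List (Char × Char)) (k : Bool)
    (hk : ∀ q ∈ h, pvKey q = k) (i : Nat) (hi : i < h.length) :
    pvKeyD (h ++ r) i = k := by
  simp only [pvKeyD, List.getD_eq_getElem?_getD, List.getElem?_append_left hi,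
    List.getElem?_eq_getElem hi]
  exact hk _ (List.getElem_mem hi)

theorem pvKeyD_append_right (h r : List (Char × Char)) (j : Nat) :
    pvKeyD (h ++ r) (h.length + j) = pvKeyD r j := by
  simp only [pvKeyD, List.getD_eq_getElem?_getD,
    List.getElem?_append_right (by omega : h.length ≤ h.length + j), Nat.add_sub_cancel_left]

-- cut positions of l = run ++ r: none inside the run, one at its end, then r's shifted
theorem pvCutsN_decomp (p : Char × Char) (t r : List (Char × Char)) (k : Bool)
    (hk : ∀ q ∈ p :: t, pvKey q = k) (hr : ∀ h' ∈ r.head?, pvKey h' ≠ k) :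
    pvCutsN ((p :: t) ++ r) =
      (match r with
       | [] => []
       | _ :: _ => (t.length + 1) :: (pvCutsN r).map (t.length + 1 + ·)) := by
  have hlen : ((p :: t) ++ r).length = (t.length + 1) + r.length := by
    simp only [List.length_append, List.length_cons]
  have hKh : ∀ i < t.length + 1, pvKeyD ((p :: t) ++ r) i = k := by
    intro i hi
    exact pvKeyD_append_left _ _ k hk i (by simp only [List.length_cons]; exact hi)
  have hKr : ∀ j : Nat, pvKeyD ((p :: t) ++ r) (t.length + 1 + j) = pvKeyD r j := by
    intro j
    have := pvKeyD_append_right (p :: t) r j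
    simp only [List.length_cons] at this
    exact this
  have hsplit : List.range' 1 ((t.length + 1) + r.length - 1)
      = List.range' 1 t.length ++ List.range' (t.length + 1) r.length := by
    have h1 : (t.length + 1) + r.length - 1 = t.length + r.length := by omega
    have h2 : (1 : Nat) + t.length = t.length + 1 := by omega
    rw [h1, ← List.range'_append_1, h2]
  have hfirst : (List.range' 1 t.length).filter
      (fun i => !(pvKeyD ((p :: t) ++ r) i == pvKeyD ((p :: t) ++ r) (i - 1))) = [] := by
    apply List.filter_eq_nil_iff.mpr
    intro i hi
    have hmem := List.mem_range'_1.mp hi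
    rw [hKh i (by omega), hKh (i - 1) (by omega)]
    simp
  unfold pvCutsN
  rw [hlen, hsplit, List.filter_append, hfirst, List.nil_append]
  cases r with
  | nil => simp
  | cons h rest =>
    have hrange : List.range' (t.length + 1) (h :: rest).length
        = (t.length + 1) :: (List.range' 1 ((h :: rest).length - 1)).map (t.length + 1 + ·) := by
      have h2 : (List.range' 1 ((h :: rest).length - 1)).map (t.length + 1 + ·)
          = List.range' (t.length + 1 + 1) ((h :: rest).length - 1) := by
        rw [List.map_add_range']
      rw [h2]
      simp only [List.length_cons, Nat.add_sub_cancel]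
      rw [List.range'_succ]
    rw [hrange]
    have hPc : (!(pvKeyD ((p :: t) ++ h :: rest) (t.length + 1)
        == pvKeyD ((p :: t) ++ h :: rest) (t.length + 1 - 1))) = true := by
      have h0 : pvKeyD ((p :: t) ++ h :: rest) (t.length + 1) = pvKey h := by
        have := hKr 0
        simpa [pvKeyD] using this
      have h1 : pvKeyD ((p :: t) ++ h :: rest) (t.length + 1 - 1) = k := hKh _ (by omega)
      have hne : pvKey h ≠ k := hr h (by rfl)
      rw [h0, h1]
      cases hx : pvKey h <;> cases k <;> simp_all
    rw [List.filter_cons, hPc]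
    simp only [if_pos trivial]
    congr 1
    rw [List.filter_map]
    have hcong : (List.range' 1 ((h :: rest).length - 1)).filter
        ((fun i => !(pvKeyD ((p :: t) ++ h :: rest) i == pvKeyD ((p :: t) ++ h :: rest) (i - 1)))
          ∘ (t.length + 1 + ·))
        = (List.range' 1 ((h :: rest).length - 1)).filter
            (fun i => !(pvKeyD (h :: rest) i == pvKeyD (h :: rest) (i - 1))) := by
      apply List.filter_congr
      intro i hi
      have hmem := List.mem_range'_1.mp hi
      have e1 : pvKeyD ((p :: t) ++ h :: rest) (t.length + 1 + i) = pvKeyD (h :: rest) i := hKr i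
      have e2 : pvKeyD ((p :: t) ++ h :: rest) (t.length + 1 + i - 1)
          = pvKeyD (h :: rest) (i - 1) := by
        have hstep : t.length + 1 + i - 1 = t.length + 1 + (i - 1) := by omega
        rw [hstep, hKr]
      simp only [Function.comp_apply, e1, e2]
    rw [hcong]

theorem pvSlices_eq_groupby_fuel : ∀ (n : Nat) (l : List (Char × Char)),
    l.length ≤ n → l ≠ [] → pvSlices l = pvGroupby l := by
  intro n
  induction n with
  | zero =>
    intro l hlen hne
    cases l with
    | nil => exact absurd rfl hne
    | cons p ps => simp at hlen
  | succ n ih =>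
    intro l hlen hne
    cases l with
    | nil => exact absurd rfl hne
    | cons p ps =>
      obtain ⟨t, r, hps, hkt1, hhead⟩ : ∃ t r : List (Char × Char), ps = t ++ r ∧
          (∀ q ∈ t, pvKey q = pvKey p) ∧ (∀ h' ∈ r.head?, pvKey h' ≠ pvKey p) := by
        refine ⟨ps.takeWhile (fun q => pvKey q == pvKey p),
                ps.dropWhile (fun q => pvKey q == pvKey p),
                (List.takeWhile_append_dropWhile).symm, ?_, ?_⟩
        · intro q hq
          have := List.mem_takeWhile_imp hq
          simpa using this
        · intro h' hh'
          have hlem := List.head?_dropWhile_not (fun q => pvKey q == pvKey p) ps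
          cases hr : (ps.dropWhile (fun q => pvKey q == pvKey p)).head? with
          | none => rw [hr] at hh'; simp at hh'
          | some x =>
            rw [hr] at hh' hlem
            simp only [Option.mem_some_iff] at hh'
            subst hh'
            simpa using hlem
      subst hps
      have hkt : ∀ q ∈ p :: t, pvKey q = pvKey p := by
        intro q hq
        rcases List.mem_cons.mp hq with h | h
        · rw [h]
        · exact hkt1 q h
      have hl : p :: (t ++ r) = (p :: t) ++ r := rfl
      cases r with
      | nil =>
        have hgb : pvGroupby (p :: (t ++ ([] : List (Char × Char)))) = [p :: t] := by
          show pvGroupbyGo (pvKey p) [p] (t ++ []) = _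
          rw [pvGroupbyGo_spec t [] (pvKey p) [p] hkt1 hhead]
          rfl
        have hcuts := pvCutsN_decomp p t [] (pvKey p) hkt hhead
        rw [hgb]
        unfold pvSlices
        rw [hl, hcuts]
        simp
      | cons h rest =>
        have hgb : pvGroupby (p :: (t ++ h :: rest))
            = (p :: t) :: pvGroupbyGo (pvKey h) [h] rest := by
          show pvGroupbyGo (pvKey p) [p] (t ++ h :: rest) = _
          rw [pvGroupbyGo_spec t (h :: rest) (pvKey p) [p] hkt1 hhead]
          rfl
        have hcuts : pvCutsN ((p :: t) ++ h :: rest)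
            = (t.length + 1) :: (pvCutsN (h :: rest)).map (t.length + 1 + ·) :=
          pvCutsN_decomp p t (h :: rest) (pvKey p) hkt hhead
        have hrlen : (h :: rest).length ≤ n := by
          simp at hlen ⊢
          omega
        have hih := ih (h :: rest) hrlen (by simp)
        rw [hgb]
        show pvSlices ((p :: t) ++ h :: rest) = (p :: t) :: pvGroupbyGo (pvKey h) [h] rest
        have hgbr : pvGroupbyGo (pvKey h) [h] rest = pvGroupby (h :: rest) := rfl
        rw [hgbr, ← hih]
        unfold pvSlices
        rw [hcuts]
        simp only [List.cons_append]
        rw [List.zip_cons_cons, List.map_cons]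
        congr 1
        · show ((p :: t ++ h :: rest).drop 0).take (t.length + 1 - 0) = p :: t
          rw [List.drop_zero, Nat.sub_zero]
          show ((p :: t) ++ (h :: rest)).take (p :: t).length = p :: t
          exact List.take_left
        · have hL : (p :: (t ++ h :: rest)).length = t.length + 1 + (h :: rest).length := by
            simp only [List.length_append, List.length_cons]; omega
          have hM2 : (pvCutsN (h :: rest)).map (t.length + 1 + ·) ++ [(p :: (t ++ h :: rest)).length]
              = (pvCutsN (h :: rest) ++ [(h :: rest).length]).map (t.length + 1 + ·) := by
            rw [List.map_append, hL]
            rfl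
          rw [hM2]
          have hM1 : (t.length + 1) :: (pvCutsN (h :: rest) ++ [(h :: rest).length]).map (t.length + 1 + ·)
              = (0 :: (pvCutsN (h :: rest) ++ [(h :: rest).length])).map (t.length + 1 + ·) := by
            simp
          rw [hM1, List.zip_map, List.map_map]
          apply List.map_congr_left
          intro q _
          show ((p :: t ++ h :: rest).drop (t.length + 1 + q.1)).take
              ((t.length + 1 + q.2) - (t.length + 1 + q.1)) = ((h :: rest).drop q.1).take (q.2 - q.1)
          have hsub : (t.length + 1 + q.2) - (t.length + 1 + q.1) = q.2 - q.1 :=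
            Nat.add_sub_add_left _ _ _
          have hdrop : (p :: t ++ h :: rest).drop (t.length + 1 + q.1) = (h :: rest).drop q.1 := by
            show ((p :: t) ++ (h :: rest)).drop ((p :: t).length + q.1) = (h :: rest).drop q.1
            exact List.drop_length_add_append _
          rw [hsub, hdrop]

theorem pvSlices_eq_groupby (l : List (Char × Char)) (hne : l ≠ []) :
    pvSlices l = pvGroupby l :=
  pvSlices_eq_groupby_fuel l.length l (le_refl _) hne

-- ---- bridging B's Int/String computation to the Nat/list level ----

theorem pvMapFst_zip (as bs : List Char) : (as.zip bs).map Prod.fst = as.take bs.length := by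
  induction as generalizing bs with
  | nil => simp
  | cons x as ih => cases bs <;> simp [ih]

theorem pvMapSnd_zip (as bs : List Char) : (as.zip bs).map Prod.snd = bs.take as.length := by
  induction as generalizing bs with
  | nil => simp
  | cons x as ih => cases bs <;> simp [ih]

theorem pvCutsN_mem_bound (l : List (Char × Char)) (i : Nat) (hi : i ∈ pvCutsN l) :
    i ≤ l.length := by
  unfold pvCutsN at hi
  have := List.mem_range'_1.mp (List.mem_of_mem_filter hi)
  omega

theorem pvKeyD_zip (as bs : List Char) (i : Nat) (hi : i < min as.length bs.length) :
    (as.getD i ' ' == bs.getD i ' ') = pvKeyD (as.zip bs) i := by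
  have h1 : i < as.length := by omega
  have h2 : i < bs.length := by omega
  have h3 : i < (as.zip bs).length := by simp only [List.length_zip]; omega
  rw [List.getD_eq_getElem as ' ' h1, List.getD_eq_getElem bs ' ' h2]
  unfold pvKeyD pvKey
  rw [List.getD_eq_getElem _ _ h3, List.getElem_zip]

theorem pvStrSlice (s : String) (lo hi : Nat) :
    PySem.Str.slice s (some (lo : Int)) (some (hi : Int))
      = String.ofList ((s.toList.drop lo).take (hi - lo)) := by
  apply String.toList_inj.mp
  rw [PySem.Str.toList_slice]
  simp [PySem.Chars.slice_eq_listSlice, PySem.List.slice_natCast]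

theorem pvAltMatch_eq (a b fill : String) :
    pvAltMatch a b fill
      = (pvGroupby (a.toList.zip b.toList)).map
          (fun g => (PySem.Str.replace (String.ofList (g.map Prod.fst)) fill "",
                     PySem.Str.replace (String.ofList (g.map Prod.snd)) fill "")) := by
  have hlen : (a.toList.zip b.toList).length = min a.toList.length b.toList.length :=
    List.length_zip
  have hmin : min (PySem.Str.len a) (PySem.Str.len b)
      = ((min a.toList.length b.toList.length : Nat) : Int) := by
    rw [PySem.Str.len_eq, PySem.Str.len_eq, Nat.cast_min]
  by_cases h0 : min a.toList.length b.toList.length = 0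
  · have hl : a.toList.zip b.toList = [] := by
      apply List.eq_nil_of_length_eq_zero
      omega
    unfold pvAltMatch
    rw [hmin, h0]
    simp [hl, pvGroupby]
  · have hne : a.toList.zip b.toList ≠ [] := by
      intro hc
      rw [hc] at hlen
      simp only [List.length_nil] at hlen
      omega
    unfold pvAltMatch
    rw [hmin]
    have hcond : (((min a.toList.length b.toList.length : Nat) : Int) == 0) = false := by
      simp only [beq_eq_false_iff_ne, ne_eq]
      omega
    simp only [hcond, Bool.false_eq_true, if_false]
    -- the Int cut list is the Nat cut list, cast
    have hfilt : (PySem.List.pyRange 1 ((min a.toList.length b.toList.length : Nat) : Int) 1).filter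
          (fun i => !((PySem.List.pyGetD a.toList i ' ' == PySem.List.pyGetD b.toList i ' ')
                    == (PySem.List.pyGetD a.toList (i - 1) ' ' == PySem.List.pyGetD b.toList (i - 1) ' ')))
        = (pvCutsN (a.toList.zip b.toList)).map (Nat.cast : Nat → Int) := by
      rw [PySem.List.pyRange_one]
      have ht : (((min a.toList.length b.toList.length : Nat) : Int) - 1).toNat
          = min a.toList.length b.toList.length - 1 := by omega
      rw [ht]
      have hr : (List.range (min a.toList.length b.toList.length - 1)).map
            (fun k : Nat => (1 : Int) + (k : Int))
          = (List.range' 1 (min a.toList.length b.toList.length - 1)).map (Nat.cast : Nat → Int) := by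
        rw [List.range'_eq_map_range, List.map_map]
        apply List.map_congr_left
        intro k _
        simp only [Function.comp_apply]
        push_cast
        ring
      rw [hr, List.filter_map]
      unfold pvCutsN
      rw [hlen]
      congr 1
      apply List.filter_congr
      intro i hi
      have hmem := List.mem_range'_1.mp hi
      simp only [Function.comp_apply, PySem.List.pyGetD_natCast]
      have hc1 : (i : Int) - 1 = ((i - 1 : Nat) : Int) := by omega
      rw [hc1, PySem.List.pyGetD_natCast, PySem.List.pyGetD_natCast]
      rw [pvKeyD_zip a.toList b.toList i (by omega),
          pvKeyD_zip a.toList b.toList (i - 1) (by omega)]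
    rw [hfilt]
    -- the whole Int bounds list is the Nat bounds list, cast
    have hbounds : ((0 : Int) :: (pvCutsN (a.toList.zip b.toList)).map (Nat.cast : Nat → Int))
          ++ [((min a.toList.length b.toList.length : Nat) : Int)]
        = ((0 :: pvCutsN (a.toList.zip b.toList))
            ++ [min a.toList.length b.toList.length]).map (Nat.cast : Nat → Int) := by
      simp
    rw [hbounds]
    rw [← pvSlices_eq_groupby _ hne]
    unfold pvSlices
    rw [hlen]
    rw [← List.map_tail, List.zip_map, List.map_map, List.map_map]
    apply List.map_congr_left
    intro q hq
    have hq2 : q.2 ≤ min a.toList.length b.toList.length := by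
      have hmem : q.2 ∈ ((0 :: pvCutsN (a.toList.zip b.toList))
          ++ [min a.toList.length b.toList.length]).tail := (List.of_mem_zip hq).2
      have htail : ((0 :: pvCutsN (a.toList.zip b.toList))
          ++ [min a.toList.length b.toList.length]).tail
          = pvCutsN (a.toList.zip b.toList) ++ [min a.toList.length b.toList.length] := rfl
      rw [htail] at hmem
      rcases List.mem_append.mp hmem with h | h
      · have := pvCutsN_mem_bound _ _ h
        omega
      · simp only [List.mem_singleton] at h
        omega
    have hfst : ((((a.toList.zip b.toList).drop q.1).take (q.2 - q.1)).map Prod.fst)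
        = (a.toList.drop q.1).take (q.2 - q.1) := by
      rw [List.map_take, List.map_drop, pvMapFst_zip, List.drop_take, List.take_take]
      congr 1
      omega
    have hsnd : ((((a.toList.zip b.toList).drop q.1).take (q.2 - q.1)).map Prod.snd)
        = (b.toList.drop q.1).take (q.2 - q.1) := by
      rw [List.map_take, List.map_drop, pvMapSnd_zip, List.drop_take, List.take_take]
      congr 1
      omega
    simp only [Function.comp_apply, Prod.map_fst, Prod.map_snd]
    rw [pvStrSlice, pvStrSlice, hfst, hsnd]

theorem pvMatch_eq (a b fill : String) :
    pvClearFill (pvFindMatches a b) fill = pvAltMatch a b fill := by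
  unfold pvFindMatches pvClearFill
  rw [pvFindMatches_eq_groupby, List.map_map, pvAltMatch_eq]
  apply List.map_congr_left
  intro g _
  simp [pvRunStr, Function.comp]

-- ===== VERDICT (by name: the statement is the Claim_ definition above) =====
theorem filter_alignments_spec : Claim_equal_filter_alignments := by
  intro alignments fill limit _ _
  unfold Spec_filter_alignments filter_alignments filter_alignments_alt
  congr 2
  funext st ab
  rw [pvMatch_eq]
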